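-- pv_equiv track=rewrite | github.com/geobarry/line-simplify | linesimplify/data_utils.py | sequence_info
-- ===== SOURCE A (Python) =====
-- def sequence_info(a_list):
--     """
--     Provides a reverse lookup for any sortable list.
--
--     Parameters
--     ----------
--     a_list : list
--         The items to be put in sequence. A list, or any indexable collection of sortable values.
--
--     Returns
--     -------
--     seq : list of integers
--         The indices of the original list, in ascending order of value.
--     ranks : TYPE
--         The ranks of each value in the original list.
--
--     """
--     seq = [(i,a_list[i]) for i in range(len(a_list))]
--     seq.sort(key = lambda x:x[1])
--     seq = [x[0] for x in seq]
--     ranks = [-1]*len(seq)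
--     for i in range(len(seq)):
--         ranks[seq[i]]=i
--     return seq,ranks
-- ===== SOURCE B (Python) =====
-- def sequence_info(a_list):
--     # seq = argsort(a_list); ranks = argsort(seq) (the inverse permutation,
--     # obtained by a second argsort instead of a scatter-assignment loop).
--     seq = sorted(range(len(a_list)), key=a_list.__getitem__)
--     ranks = sorted(range(len(seq)), key=seq.__getitem__)
--     return seq, ranks
-- ===== Notes on version B (the rewrite author's own statement) =====
-- stated objective: alternative
-- what changed: seq is computed as a direct argsort of the index range (no (index,value) pair construction/unpacking), and ranks is the inverse permutation obtained by a second argsort of seq instead of A's [-1]-initialised scatter-assignment loop ranks[seq[i]]=i.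
import Mathlib
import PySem

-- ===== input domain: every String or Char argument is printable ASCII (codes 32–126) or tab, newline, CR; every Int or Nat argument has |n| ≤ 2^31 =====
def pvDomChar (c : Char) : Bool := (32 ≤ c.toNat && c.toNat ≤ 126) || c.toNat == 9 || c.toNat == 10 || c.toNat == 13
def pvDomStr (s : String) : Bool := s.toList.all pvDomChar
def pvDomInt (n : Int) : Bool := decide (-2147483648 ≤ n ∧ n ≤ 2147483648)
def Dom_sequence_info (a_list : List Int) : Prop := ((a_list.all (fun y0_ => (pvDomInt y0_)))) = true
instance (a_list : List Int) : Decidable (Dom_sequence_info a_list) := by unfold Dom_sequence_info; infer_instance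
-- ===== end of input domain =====

-- B replaces A's scatter-assignment loop for the ranks by a second argsort of seq
-- (the inverse permutation); same cost, different decomposition (objective: alternative).

-- ===== PORT A =====
-- seq = [(i, a_list[i]) for i in range(len(a_list))]; sort by value; take indices;
-- then ranks = [-1]*n and ranks[seq[i]] = i for each i.  The pyGetD/pySetD defaults
-- are never reached: every index comes from range(len(…)) or is an element of seq.
def sequence_info (a_list : List Int) : List Int × List Int :=
  let seq0 : List (Int × Int) :=
    (PySem.List.pyRange 0 a_list.length 1).map (fun i => (i, PySem.List.pyGetD a_list i 0))
  let seq1 := PySem.List.sorted seq0 (fun x => x.2)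
  let seq := seq1.map (fun x => x.1)
  let ranks0 : List Int := List.replicate seq.length (-1)
  let ranks := (PySem.List.pyRange 0 (seq.length : Int) 1).foldl
      (fun r i => PySem.List.pySetD r (PySem.List.pyGetD seq i 0) i) ranks0
  (seq, ranks)

-- ===== PORT B =====
-- seq = sorted(range(len(a_list)), key=a_list.__getitem__)
-- ranks = sorted(range(len(seq)), key=seq.__getitem__)
def sequence_info_alt (a_list : List Int) : List Int × List Int :=
  let seq := PySem.List.sorted (PySem.List.pyRange 0 a_list.length 1)
      (fun i => PySem.List.pyGetD a_list i 0)
  let ranks := PySem.List.sorted (PySem.List.pyRange 0 (seq.length : Int) 1)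
      (fun i => PySem.List.pyGetD seq i 0)
  (seq, ranks)

-- ===== PRECONDITION & SPEC =====
def Spec_sequence_info (a_list : List Int) (out : List Int × List Int) : Prop := out = sequence_info_alt a_list
instance (a_list : List Int) (out : List Int × List Int) : Decidable (Spec_sequence_info a_list out) := by unfold Spec_sequence_info; infer_instance

-- ===== CLAIM (what is proved, stated in full; the proofs are below) =====
def Claim_equal_sequence_info : Prop := ∀ (a_list : List Int), Dom_sequence_info a_list → Spec_sequence_info a_list (sequence_info a_list)

-- ===== LEMMAS AND PROOFS =====

-- insertBy commutes with map when the comparison factors through the map.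
lemma insertBy_map {α β κ : Type} [LT κ] [DecidableLT κ] (f : α → β) (key : β → κ)
    (x : α) (ys : List α) :
    PySem.List.insertBy (fun a b => decide (key a < key b)) (f x) (ys.map f)
      = (PySem.List.insertBy (fun a b => decide (key (f a) < key (f b))) x ys).map f := by
  induction ys with
  | nil => simp [PySem.List.insertBy]
  | cons y ys ih =>
      simp only [List.map_cons, PySem.List.insertBy]
      split_ifs <;> simp [ih]

-- sorting a mapped list by `key` is mapping the list sorted by `key ∘ f`.
lemma sorted_map_comm {α β κ : Type} [LT κ] [DecidableLT κ] (xs : List α) (f : α → β)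
    (key : β → κ) :
    PySem.List.sorted (xs.map f) key
      = (PySem.List.sorted xs (fun x => key (f x))).map f := by
  rw [PySem.List.sorted_eq_foldl_insertBy, PySem.List.sorted_eq_foldl_insertBy, List.foldl_map]
  suffices h : ∀ acc : List α,
      xs.foldl (fun acc x => PySem.List.insertBy (fun a b => decide (key a < key b)) (f x) acc)
        (acc.map f)
      = (xs.foldl (fun acc x =>
          PySem.List.insertBy (fun a b => decide (key (f a) < key (f b))) x acc) acc).map f by
    simpa using h []
  induction xs with
  | nil => intro acc; simp
  | cons x xs ih =>
      intro acc
      simp only [List.foldl_cons, insertBy_map]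
      exact ih _

-- A's seq (sort of (index, value) pairs, then first components) is B's argsort.
lemma seq_eq (a : List Int) :
    (PySem.List.sorted
        ((PySem.List.pyRange 0 a.length 1).map (fun i => (i, PySem.List.pyGetD a i 0)))
        (fun x => x.2)).map (fun x => x.1)
      = PySem.List.sorted (PySem.List.pyRange 0 a.length 1)
          (fun i => PySem.List.pyGetD a i 0) := by
  rw [sorted_map_comm]
  simp [Function.comp_def]

-- intermediate state of A's scatter loop after the first k steps: position j holds
-- idxOf j for every j already hit (j ∈ seq.take k) and -1 elsewhere.
def scatterState (seq : List Int) (k : Nat) : List Int :=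
  (List.range seq.length).map
    (fun j : Nat => if ((j : Int)) ∈ seq.take k then ((seq.idxOf ((j : Int)) : Nat) : Int) else (-1 : Int))

lemma scatter_take (seq : List Int) (hnd : seq.Nodup)
    (hmem : ∀ x ∈ seq, 0 ≤ x ∧ x < (seq.length : Int)) :
    ∀ k : Nat, k ≤ seq.length →
    (PySem.List.pyRange 0 (k : Int) 1).foldl
        (fun r i => PySem.List.pySetD r (PySem.List.pyGetD seq i 0) i)
        (List.replicate seq.length (-1))
      = scatterState seq k := by
  intro k
  induction k with
  | zero => intro _; simp [PySem.List.pyRange, scatterState]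
  | succ k ih =>
      intro hk1
      have hk : k < seq.length := hk1
      have hr : PySem.List.pyRange 0 ((k+1 : Nat) : Int) 1
          = PySem.List.pyRange 0 (k:Int) 1 ++ [(k:Int)] := by
        push_cast
        exact PySem.List.pyRange_one_succ_right (by positivity)
      rw [hr, List.foldl_append, ih (le_of_lt hk)]
      simp only [List.foldl_cons, List.foldl_nil]
      have hget : PySem.List.pyGetD seq (k:Int) 0 = seq[k] := by
        simp [List.getD_eq_getElem?_getD, hk]
      have hv := hmem seq[k] (List.getElem_mem hk)
      rw [hget, PySem.List.pySetD_of_nonneg _ _ hv.1]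
      have htake : seq.take (k+1) = seq.take k ++ [seq[k]] := by
        rw [List.take_add_one]
        simp [List.getElem?_eq_getElem hk]
      apply List.ext_getElem
      · simp [scatterState]
      · intro j h1 h2
        have hjlen : j < seq.length := by simpa [scatterState] using h2
        rw [List.getElem_set]
        simp only [scatterState, List.getElem_map, List.getElem_range, htake,
          List.mem_append, List.mem_singleton]
        by_cases hj : seq[k].toNat = j
        · have hjv : (j : Int) = seq[k] := by
            rw [← hj, Int.toNat_of_nonneg hv.1]
          have hidx : seq.idxOf seq[k] = k := List.Nodup.idxOf_getElem hnd k hk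
          simp [hj, hjv, hidx]
        · have hjv : (j : Int) ≠ seq[k] := by
            intro h; apply hj; rw [← h]; simp
          simp [hj, hjv]

-- the scatter loop equals the second argsort (B's ranks).
lemma ranks_eq (seq : List Int)
    (hperm : seq.Perm (PySem.List.pyRange 0 (seq.length : Int) 1)) :
    (PySem.List.pyRange 0 (seq.length : Int) 1).foldl
        (fun r i => PySem.List.pySetD r (PySem.List.pyGetD seq i 0) i)
        (List.replicate seq.length (-1))
      = PySem.List.sorted (PySem.List.pyRange 0 (seq.length : Int) 1)
          (fun i => PySem.List.pyGetD seq i 0) := by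
  have hndr : (PySem.List.pyRange 0 (seq.length : Int) 1).Nodup := by
    rw [PySem.List.pyRange_zero_nat]
    exact List.Nodup.map Nat.cast_injective List.nodup_range
  have hnd : seq.Nodup := hperm.nodup_iff.mpr hndr
  have hmem : ∀ x ∈ seq, 0 ≤ x ∧ x < (seq.length : Int) := by
    intro x hx
    have := hperm.mem_iff.mp hx
    exact PySem.List.mem_pyRange_one.mp this
  have hsurj : ∀ j : Nat, j < seq.length → (j : Int) ∈ seq := by
    intro j hj
    exact hperm.mem_iff.mpr (PySem.List.mem_pyRange_one.mpr ⟨by positivity, by exact_mod_cast hj⟩)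
  have hkey : ∀ j : Nat, j < seq.length →
      PySem.List.pyGetD seq ((seq.idxOf (j : Int) : Nat) : Int) 0 = (j : Int) := by
    intro j hj
    have hlt := List.idxOf_lt_length_of_mem (hsurj j hj)
    rw [PySem.List.pyGetD_natCast]
    simp [List.getD_eq_getElem?_getD, List.getElem?_eq_getElem hlt, List.getElem_idxOf]
  have hL : PySem.List.sorted (PySem.List.pyRange 0 (seq.length : Int) 1)
      (fun i => PySem.List.pyGetD seq i 0)
      = (List.range seq.length).map (fun j : Nat => ((seq.idxOf ((j : Int)) : Nat) : Int)) := by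
    apply PySem.List.sorted_eq_of_perm_of_pairwise_lt
    · have hnodupL : ((List.range seq.length).map
          (fun j : Nat => ((seq.idxOf ((j : Int)) : Nat) : Int))).Nodup := by
        refine (List.nodup_map_iff_inj_on List.nodup_range).mpr ?_
        intro x hx y hy hxy
        have hx' := List.idxOf_lt_length_of_mem (hsurj x (List.mem_range.mp hx))
        have hy' := List.idxOf_lt_length_of_mem (hsurj y (List.mem_range.mp hy))
        have hxy' : seq.idxOf (x : Int) = seq.idxOf (y : Int) := by exact_mod_cast hxy
        have : ((x : Nat) : Int) = ((y : Nat) : Int) := by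
          rw [← List.getElem_idxOf hx', ← List.getElem_idxOf hy']
          simp [hxy']
        exact_mod_cast this
      have hsub : ((List.range seq.length).map
          (fun j : Nat => ((seq.idxOf ((j : Int)) : Nat) : Int)))
          ⊆ PySem.List.pyRange 0 (seq.length : Int) 1 := by
        intro x hx
        obtain ⟨j, hj, rfl⟩ := List.mem_map.mp hx
        have hlt := List.idxOf_lt_length_of_mem (hsurj j (List.mem_range.mp hj))
        exact PySem.List.mem_pyRange_one.mpr ⟨by positivity, by exact_mod_cast hlt⟩
      refine (List.subperm_of_subset hnodupL hsub).perm_of_length_le ?_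
      simp [PySem.List.length_pyRange_one]
    · refine List.pairwise_map.mpr ?_
      refine List.pairwise_lt_range.imp_of_mem ?_
      intro a b ha hb hab
      have ha' := List.mem_range.mp ha
      have hb' := List.mem_range.mp hb
      simp only [hkey a ha', hkey b hb']
      exact_mod_cast hab
  rw [hL, scatter_take seq hnd hmem seq.length le_rfl]
  unfold scatterState
  refine List.map_congr_left ?_
  intro j hj
  rw [List.take_length, if_pos (hsurj j (List.mem_range.mp hj))]

-- ===== VERDICT (by name: the statement is the Claim_ definition above) =====
theorem sequence_info_spec : Claim_equal_sequence_info := by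
  intro a _
  unfold Spec_sequence_info sequence_info sequence_info_alt
  dsimp only
  rw [seq_eq]
  have hlen : (PySem.List.sorted (PySem.List.pyRange 0 (a.length : Int) 1)
      (fun i => PySem.List.pyGetD a i 0)).length = a.length := by
    simp [PySem.List.length_sorted, PySem.List.length_pyRange_one]
  have hperm := PySem.List.sorted_perm (PySem.List.pyRange 0 (a.length : Int) 1)
      (fun i => PySem.List.pyGetD a i 0) false
  rw [Prod.mk.injEq]
  refine ⟨rfl, ?_⟩
  exact ranks_eq _ (by rw [hlen]; exact hperm)
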